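-- pv_equiv track=rewrite | github.com/Peggaz/ZTP | Zadania/testRozwiazan/test.py | allWords
-- ===== SOURCE A (Python) =====
-- def changChar(word: str, id: int, char: str):
--     ret = list(word)
--     ret[id] = char
--     return ''.join(ret)
--
-- def MakePolCHarDick():
--     '''
--     Tworzy słownik mający odpowiedniki polskich znaków dla liter alfabetu angielskiego
--     :return: słownik zawierający odpowiedniki poskich znaków
--     '''
--     ret = {}
--     pol = "acelnos"
--     lat = "ąćęłńóś"
--     for it in range(len(pol)):
--         ret[pol[it]] = lat[it]
--     return ret
--
-- def allWords(word):
--     charDict = MakePolCHarDick()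
--     ret = [word]  # lista słów do wykorzystania
--     def extendRet(word, char):
--         word = changChar(word, it, char)  # helpWord[it] = charDict[helpWord[it]]
--         for it2 in allWords(word[it:]): ret.append(word[:it] + it2)
--     for it in range(len(word)):
--         if word[it] in charDict:
--             extendRet(word, charDict[word[it]])
--         elif word[it] == 'z':
--             extendRet(word, 'ż')
--             extendRet(word, 'ź')
--     return ret
-- ===== SOURCE B (Python) =====
-- def allWords(word):
--     # DP right-to-left over suffixes: res holds all variants of the current suffix,
--     # in the same order A produces them; each suffix is computed exactly once.
--     repl = {'a': 'ą', 'c': 'ć', 'e': 'ę', 'l': 'ł', 'n': 'ń', 'o': 'ó', 's': 'ś'}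
--     res = ['']
--     for ch in reversed(word):
--         if ch in repl:
--             variants = [repl[ch]]
--         elif ch == 'z':
--             variants = ['ż', 'ź']
--         else:
--             res = [ch + x for x in res]
--             continue
--         res = ([ch + res[0]]
--                + [c + x for c in variants for x in res]
--                + [ch + x for x in res[1:]])
--     return res
-- ===== Notes on version B (the rewrite author's own statement) =====
-- stated objective: alternative
-- what changed: Replaced A's top-down recursion, which re-enumerates the variants of each suffix once per replacement choice at every earlier position, by a single right-to-left pass that builds the variant list of each suffix exactly once from the next suffix's list.
import Mathlib
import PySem

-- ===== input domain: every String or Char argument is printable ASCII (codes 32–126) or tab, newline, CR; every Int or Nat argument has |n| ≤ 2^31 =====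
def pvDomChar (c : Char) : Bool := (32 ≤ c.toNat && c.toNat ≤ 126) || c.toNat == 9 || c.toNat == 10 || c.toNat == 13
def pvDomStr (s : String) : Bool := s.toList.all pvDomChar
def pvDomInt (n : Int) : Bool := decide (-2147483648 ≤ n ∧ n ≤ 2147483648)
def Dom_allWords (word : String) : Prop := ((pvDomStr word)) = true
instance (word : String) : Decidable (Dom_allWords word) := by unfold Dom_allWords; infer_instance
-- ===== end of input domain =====

-- B replaces A's top-down recursion (which recomputes the variant list of a suffix
-- once per replacement choice at every earlier position) by a single right-to-left pass
-- computing each suffix's variant list exactly once; an alternative algorithm of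
-- output-proportional cost (the output itself grows exponentially in the number of
-- replaceable letters, so no speed claim is made).

-- ===== PORT A =====
-- strings are handled as List Char (String ↔ List Char via toList/String.mk)

-- changChar: ret = list(word); ret[id] = char; ''.join(ret)  (id always in range here)
def changChar (w : List Char) (id : Nat) (c : Char) : List Char := w.set id c

-- MakePolCHarDick: loop over range(len("acelnos")) inserting pol[it] ↦ lat[it]
def polCharDict : PySem.Dict Char Char :=
  (PySem.List.pyRange 0 ("acelnos".toList.length : Int) 1).foldl
    (fun d it =>
      d.insert ("acelnos".toList.getD it.toNat ' ') ("ąćęłńóś".toList.getD it.toNat ' '))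
    PySem.Dict.empty

-- termination helper: 1 exactly when the loop at this position recurses
def pvBonus (c : Char) : Nat := if (polCharDict.get? c).isSome || c == 'z' then 1 else 0

-- keys of polCharDict map to values that are themselves neither keys nor 'z'
theorem pvDictVal {ch c : Char} (h : polCharDict.get? ch = some c) : pvBonus c = 0 := by
  have hd : polCharDict = PySem.Dict.mk
      [('a','ą'),('c','ć'),('e','ę'),('l','ł'),('n','ń'),('o','ó'),('s','ś')] := by decide
  rw [hd] at h
  simp only [PySem.Dict.get?_mk_cons] at h
  split_ifs at h <;>
    first
      | (simp only [Option.some.injEq] at h; subst h; decide)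
      | simp [PySem.Dict.get?] at h

-- the for-loop of allWords, from position `it` on: each replaceable position contributes
-- (prefix + it2) for it2 in the full recursive list of the replaced suffix
def allWordsCore (s : List Char) (it : Nat) : List (List Char) :=
  if h : it < s.length then
    (match hm : polCharDict.get? s[it] with
     | some c =>
        (((changChar s it c).drop it) :: allWordsCore ((changChar s it c).drop it) 0).map
          (fun it2 => (changChar s it c).take it ++ it2)
     | none =>
        if s[it] = 'z' then
          ((((changChar s it 'ż').drop it) :: allWordsCore ((changChar s it 'ż').drop it) 0).map
            (fun it2 => (changChar s it 'ż').take it ++ it2))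
          ++ ((((changChar s it 'ź').drop it) :: allWordsCore ((changChar s it 'ź').drop it) 0).map
            (fun it2 => (changChar s it 'ź').take it ++ it2))
        else []) ++ allWordsCore s (it + 1)
  else []
termination_by (s.length - it) * 2 + pvBonus (s.getD it 'x')
decreasing_by
  · have hlen : ((changChar s it c).drop it).length = s.length - it := by
      simp [changChar]
    have hget : ((changChar s it c).drop it).getD 0 'x' = c := by
      simp [changChar, List.getD, h]
    have hb : pvBonus c = 0 := pvDictVal hm
    have hcur : pvBonus (s.getD it 'x') = 1 := by
      simp [pvBonus, List.getD, h, hm]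
    simp only [hlen, hget, hb, hcur]
    omega
  · have hz : s[it] = 'z' := by assumption
    have hlen : ((changChar s it 'ż').drop it).length = s.length - it := by
      simp [changChar]
    have hget : ((changChar s it 'ż').drop it).getD 0 'x' = 'ż' := by
      simp [changChar, List.getD, h]
    have hb : pvBonus 'ż' = 0 := by decide
    have hcur : pvBonus (s.getD it 'x') = 1 := by
      simp [pvBonus, List.getD, h, hz]
    simp only [hlen, hget, hb, hcur]
    omega
  · have hz : s[it] = 'z' := by assumption
    have hlen : ((changChar s it 'ź').drop it).length = s.length - it := by
      simp [changChar]
    have hget : ((changChar s it 'ź').drop it).getD 0 'x' = 'ź' := by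
      simp [changChar, List.getD, h]
    have hb : pvBonus 'ź' = 0 := by decide
    have hcur : pvBonus (s.getD it 'x') = 1 := by
      simp [pvBonus, List.getD, h, hz]
    simp only [hlen, hget, hb, hcur]
    omega
  · have h1 : pvBonus (s.getD it 'x') ≤ 1 := by unfold pvBonus; split <;> omega
    have h2 : pvBonus (s.getD (it+1) 'x') ≤ 1 := by unfold pvBonus; split <;> omega
    omega

-- ret = [word]; the loop appends; literal port of allWords
def allWords (word : String) : List String :=
  (word.toList :: allWordsCore word.toList 0).map (fun l => String.mk l)

-- ===== PORT B =====
def bRepl : PySem.Dict Char Char :=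
  PySem.Dict.ofList [('a','ą'),('c','ć'),('e','ę'),('l','ł'),('n','ń'),('o','ó'),('s','ś')]

-- one iteration of Source B's loop body on the running suffix-variant list `res`
-- (res is never empty, so res[0] / res[1:] are headD / tail)
def bStep (ch : Char) (res : List (List Char)) : List (List Char) :=
  match bRepl.get? ch with
  | some c =>
      (ch :: res.headD []) ::
        (([c].flatMap (fun v => res.map (fun x => v :: x))) ++ res.tail.map (fun x => ch :: x))
  | none =>
      if ch = 'z' then
        (ch :: res.headD []) ::
          ((['ż','ź'].flatMap (fun v => res.map (fun x => v :: x))) ++ res.tail.map (fun x => ch :: x))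
      else res.map (fun x => ch :: x)

-- res = ['']; for ch in reversed(word): res = bStep ch res
def allWords_alt (word : String) : List String :=
  (word.toList.reverse.foldl (fun res ch => bStep ch res) [[]]).map (fun l => String.mk l)

-- ===== PRECONDITION & SPEC =====
def Spec_allWords (word : String) (out : List String) : Prop := out = allWords_alt word
instance (word : String) (out : List String) : Decidable (Spec_allWords word out) := by unfold Spec_allWords; infer_instance

-- ===== CLAIM (what is proved, stated in full; the proofs are below) =====
def Claim_equal_allWords : Prop := ∀ (word : String), Dom_allWords word → Spec_allWords word (allWords word)

-- ===== LEMMAS AND PROOFS =====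

-- the loop body past the end of the word contributes nothing
theorem core_oob (s : List Char) (it : Nat) (h : ¬ it < s.length) : allWordsCore s it = [] := by
  rw [allWordsCore]; simp [h]

-- unfolding at a position holding a dictionary key
theorem core_key (s : List Char) (it : Nat) (h : it < s.length) {c : Char}
    (hc : polCharDict.get? s[it] = some c) :
    allWordsCore s it =
      ((((changChar s it c).drop it) :: allWordsCore ((changChar s it c).drop it) 0).map
        (fun it2 => (changChar s it c).take it ++ it2)) ++ allWordsCore s (it + 1) := by
  rw [allWordsCore, dif_pos h]
  congr 1
  split <;> simp_all

-- unfolding at a position holding 'z'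
theorem core_z (s : List Char) (it : Nat) (h : it < s.length) (hz : s[it] = 'z') :
    allWordsCore s it =
      (((((changChar s it 'ż').drop it) :: allWordsCore ((changChar s it 'ż').drop it) 0).map
          (fun it2 => (changChar s it 'ż').take it ++ it2))
        ++ ((((changChar s it 'ź').drop it) :: allWordsCore ((changChar s it 'ź').drop it) 0).map
          (fun it2 => (changChar s it 'ź').take it ++ it2))) ++ allWordsCore s (it + 1) := by
  have hn : polCharDict.get? s[it] = none := by rw [hz]; decide
  rw [allWordsCore, dif_pos h]
  congr 1
  split <;> simp_all

-- unfolding at an ordinary position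
theorem core_plain (s : List Char) (it : Nat) (h : it < s.length)
    (hn : polCharDict.get? s[it] = none) (hz : s[it] ≠ 'z') :
    allWordsCore s it = allWordsCore s (it + 1) := by
  rw [allWordsCore, dif_pos h]
  split <;> simp_all

-- shifting the loop past a fixed head character
theorem core_shift (n : Nat) : ∀ (a : Char) (t : List Char) (it : Nat), t.length - it ≤ n →
    allWordsCore (a :: t) (it + 1) = (allWordsCore t it).map (fun x => a :: x) := by
  induction n with
  | zero =>
    intro a t it hle
    rw [core_oob _ _ (by simp; omega), core_oob _ _ (by omega)]
    simp
  | succ n ih =>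
    intro a t it hle
    by_cases hlt : it < t.length
    · have h1 : it + 1 < (a :: t).length := by simp; omega
      have hih : allWordsCore (a :: t) (it + 1 + 1) = (allWordsCore t (it + 1)).map (fun x => a :: x) :=
        ih a t (it + 1) (by omega)
      have hset : ∀ c, changChar (a :: t) (it + 1) c = a :: changChar t it c := by
        intro c; simp [changChar]
      rcases hg : polCharDict.get? t[it] with _ | c
      · by_cases hz : t[it] = 'z'
        · rw [core_z (a :: t) (it + 1) h1 (by simp [hz]), core_z t it hlt hz]
          simp only [hset, List.drop_succ_cons, List.take_succ_cons,
            List.map_append, List.map_map, hih]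
          rfl
        · rw [core_plain (a :: t) (it + 1) h1 (by simp [hg]) (by simp [hz]),
              core_plain t it hlt hg hz]
          exact hih
      · rw [core_key (a :: t) (it + 1) h1 (c := c) (by simp [hg]), core_key t it hlt hg]
        simp only [hset, List.drop_succ_cons, List.take_succ_cons,
          List.map_append, List.map_map, hih]
        rfl
    · rw [core_oob _ _ (by simp; omega), core_oob _ _ (by omega)]
      simp

-- a head character that is neither a dict key nor 'z' just prefixes every variant
theorem core_nonrepl (c : Char) (t : List Char) (h1 : polCharDict.get? c = none) (h2 : c ≠ 'z') :
    (c :: t) :: allWordsCore (c :: t) 0 = ((t :: allWordsCore t 0).map (fun x => c :: x)) := by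
  rw [core_plain (c :: t) 0 (by simp) (by simpa using h1) (by simpa using h2)]
  rw [show (0 : Nat) + 1 = 0 + 1 from rfl, core_shift t.length c t 0 (by omega)]
  simp

-- values of the dict are not keys and not 'z'
theorem pvDictVal' {ch c : Char} (h : polCharDict.get? ch = some c) :
    polCharDict.get? c = none ∧ c ≠ 'z' := by
  have hb := pvDictVal h
  unfold pvBonus at hb
  split at hb
  · omega
  · rename_i hcond
    rw [Bool.or_eq_true, not_or] at hcond
    refine ⟨?_, ?_⟩
    · rcases hq : polCharDict.get? c with _ | v
      · rfl
      · exact absurd (by simp [hq]) hcond.1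
    · intro hc; exact hcond.2 (by simp [hc])

theorem bRepl_eq : bRepl = polCharDict := by decide

-- the main invariant: A's full list on a char list equals B's fold
theorem core_eq_fold (s : List Char) :
    s :: allWordsCore s 0 = s.foldr bStep [[]] := by
  induction s with
  | nil =>
    rw [core_oob _ _ (by simp)]; rfl
  | cons a t ih =>
    have hshift := core_shift t.length a t 0 (by omega)
    rw [List.foldr_cons, ← ih]
    unfold bStep
    rw [bRepl_eq]
    rcases hg : polCharDict.get? a with _ | c
    · by_cases hz : a = 'z'
      · subst hz
        rw [core_z ('z' :: t) 0 (by simp) (by simp)]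
        simp [changChar, hshift, Function.comp_def,
          core_nonrepl 'ż' t (by decide) (by decide),
          core_nonrepl 'ź' t (by decide) (by decide), List.flatMap]
      · rw [core_plain (a :: t) 0 (by simp) (by simpa using hg) (by simpa using hz)]
        simp only [if_neg hz]
        simp [hshift]
    · rw [core_key (a :: t) 0 (by simp) (by simpa using hg)]
      have hv := pvDictVal' hg
      simp [changChar, hshift, core_nonrepl c t hv.1 hv.2, List.flatMap]

-- ===== VERDICT (by name: the statement is the Claim_ definition above) =====
theorem allWords_spec : Claim_equal_allWords := by
  intro word _
  unfold Spec_allWords allWords allWords_alt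
  rw [List.foldl_reverse, ← core_eq_fold]
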